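-- pv_equiv track=rewrite | github.com/SauersML/ferromic | stats/snp_subset.py | coalesce_indices
-- ===== SOURCE A (Python) =====
-- from typing import Dict, List, Tuple
--
-- def coalesce_indices(indices: List[int], max_gap: int) -> List[List[int]]:
--     """Group sorted indices into runs where consecutive elements differ by <= max_gap."""
--     if not indices:
--         return []
--     runs: List[List[int]] = []
--     current = [indices[0]]
--     for i in indices[1:]:
--         if i - current[-1] <= max_gap:
--             current.append(i)
--         else:
--             runs.append(current)
--             current = [i]
--     runs.append(current)
--     return runs
-- ===== SOURCE B (Python) =====
-- from typing import Dict, List, Tuple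
--
-- def coalesce_indices(indices: List[int], max_gap: int) -> List[List[int]]:
--     """Two-pass: first compute run lengths from consecutive differences, then slice."""
--     if not indices:
--         return []
--     sizes: List[int] = []
--     run_len = 1
--     for prev, cur in zip(indices, indices[1:]):
--         if cur - prev > max_gap:
--             sizes.append(run_len)
--             run_len = 1
--         else:
--             run_len += 1
--     sizes.append(run_len)
--     out: List[List[int]] = []
--     pos = 0
--     for s in sizes:
--         out.append(indices[pos:pos + s])
--         pos += s
--     return out
-- ===== Notes on version B (the rewrite author's own statement) =====
-- stated objective: alternative
-- what changed: Instead of growing a 'current' run by appending inside one stateful loop, B first computes the run lengths in one pass over consecutive pairs (zip of the list with its tail) and then produces the runs in a second pass by slicing the input at those lengths.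
import Mathlib
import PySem

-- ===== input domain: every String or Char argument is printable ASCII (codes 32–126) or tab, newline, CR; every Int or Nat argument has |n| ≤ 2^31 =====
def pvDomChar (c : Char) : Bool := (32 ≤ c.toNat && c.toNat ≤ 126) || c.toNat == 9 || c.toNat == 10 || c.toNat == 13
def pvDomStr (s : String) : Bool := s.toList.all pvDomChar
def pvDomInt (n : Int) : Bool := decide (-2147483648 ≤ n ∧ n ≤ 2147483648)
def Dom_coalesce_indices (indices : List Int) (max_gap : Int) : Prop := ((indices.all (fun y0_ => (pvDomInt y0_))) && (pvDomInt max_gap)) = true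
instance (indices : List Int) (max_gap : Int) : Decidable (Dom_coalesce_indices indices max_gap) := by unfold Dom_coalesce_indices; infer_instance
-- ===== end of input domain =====

-- B replaces A's single stateful run-building loop by a run-length pass over consecutive pairs plus a slicing pass (alternative decomposition, same cost).


-- ===== PORT A =====
-- literal port of A: one loop over indices[1:], state (runs, current);
-- current[-1] via pyGet? (current is never empty, so .getD 0 is never consulted)
def coalesce_indices (indices : List Int) (max_gap : Int) : List (List Int) :=
  match indices with
  | [] => []
  | x :: _ =>
    let st := (PySem.List.slice indices (some 1) none).foldl
      (fun (s : List (List Int) × List Int) i =>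
        if i - (PySem.List.pyGet? s.2 (-1)).getD 0 ≤ max_gap then (s.1, s.2 ++ [i])
        else (s.1 ++ [s.2], [i]))
      ([], [x])
    st.1 ++ [st.2]

-- ===== PORT B =====
-- literal port of Source B: pass 1 computes run lengths over zip(indices, indices[1:]);
-- pass 2 slices indices at the accumulated positions
def coalesce_indices_alt (indices : List Int) (max_gap : Int) : List (List Int) :=
  match indices with
  | [] => []
  | _ :: _ =>
    let p1 := (indices.zip (PySem.List.slice indices (some 1) none)).foldl
      (fun (st : List Int × Int) pc =>
        if pc.2 - pc.1 > max_gap then (st.1 ++ [st.2], 1) else (st.1, st.2 + 1))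
      ([], 1)
    let sizes := p1.1 ++ [p1.2]
    let p2 := sizes.foldl
      (fun (st : List (List Int) × Int) s =>
        (st.1 ++ [PySem.List.slice indices (some st.2) (some (st.2 + s))], st.2 + s))
      ([], 0)
    p2.1

-- ===== PRECONDITION & SPEC =====
def Spec_coalesce_indices (indices : List Int) (max_gap : Int) (out : List (List Int)) : Prop := out = coalesce_indices_alt indices max_gap
instance (indices : List Int) (max_gap : Int) (out : List (List Int)) : Decidable (Spec_coalesce_indices indices max_gap out) := by unfold Spec_coalesce_indices; infer_instance

-- ===== CLAIM (what is proved, stated in full; the proofs are below) =====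
def Claim_equal_coalesce_indices : Prop := ∀ (indices : List Int) (max_gap : Int), Dom_coalesce_indices indices max_gap → Spec_coalesce_indices indices max_gap (coalesce_indices indices max_gap)

-- ===== LEMMAS AND PROOFS =====

-- canonical recursive grouping: cur is the current run, l its last element
def runsAux (g : Int) (cur : List Int) (l : Int) : List Int → List (List Int)
  | [] => [cur]
  | i :: rest => if i - l ≤ g then runsAux g (cur ++ [i]) i rest else cur :: runsAux g [i] i rest

theorem runsAux_flatten (g : Int) : ∀ (xs cur : List Int) (l : Int),
    (runsAux g cur l xs).flatten = cur ++ xs := by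
  intro xs
  induction xs with
  | nil => intro cur l; simp [runsAux]
  | cons i rest ih =>
    intro cur l
    by_cases h : i - l ≤ g <;> simp [runsAux, h, ih]

theorem foldA (g : Int) : ∀ (xs : List Int) (runs : List (List Int)) (c : List Int) (l : Int),
    (let st := xs.foldl
      (fun (s : List (List Int) × List Int) i =>
        if i - (PySem.List.pyGet? s.2 (-1)).getD 0 ≤ g then (s.1, s.2 ++ [i])
        else (s.1 ++ [s.2], [i]))
      (runs, c ++ [l]);
     st.1 ++ [st.2]) = runs ++ runsAux g (c ++ [l]) l xs := by
  intro xs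
  induction xs with
  | nil => intro runs c l; simp [runsAux]
  | cons i rest ih =>
    intro runs c l
    simp only [List.foldl_cons, PySem.List.pyGet?_neg_one_append_singleton, Option.getD_some]
    by_cases h : i - l ≤ g
    · simpa [runsAux, h, List.append_assoc] using ih runs (c ++ [l]) i
    · rw [if_neg h]
      have := ih (runs ++ [c ++ [l]]) [] i
      simp only [List.nil_append] at this
      rw [this]
      simp [runsAux, h]

theorem lensB (g : Int) : ∀ (xs : List Int) (l : Int) (sz : List Int) (c : List Int),
    (let st := ((l :: xs).zip xs).foldl
      (fun (st : List Int × Int) pc =>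
        if pc.2 - pc.1 > g then (st.1 ++ [st.2], 1) else (st.1, st.2 + 1))
      (sz, (c.length : Int) + 1);
     st.1 ++ [st.2]) = sz ++ (runsAux g (c ++ [l]) l xs).map (fun r => (r.length : Int)) := by
  intro xs
  induction xs with
  | nil => intro l sz c; simp [runsAux]
  | cons i rest ih =>
    intro l sz c
    simp only [List.zip_cons_cons, List.foldl_cons]
    by_cases h : i - l > g
    · have := ih i (sz ++ [(c.length : Int) + 1]) []
      simp only [List.length_nil, Nat.cast_zero, Int.zero_add, List.nil_append] at this
      have hle : ¬ i - l ≤ g := by omega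
      simp [h, runsAux, hle, this]
    · have := ih i sz (c ++ [l])
      have hc : ((c ++ [l]).length : Int) + 1 = (c.length : Int) + 1 + 1 := by
        simp
      rw [hc] at this
      have hle : i - l ≤ g := by omega
      simp [h, runsAux, hle, this]

theorem slices_loop : ∀ (cs : List (List Int)) (pre : List Int) (out : List (List Int)) (full : List Int),
    full = pre ++ cs.flatten →
    ((cs.map (fun r => (r.length : Int))).foldl
      (fun (st : List (List Int) × Int) s =>
        (st.1 ++ [PySem.List.slice full (some st.2) (some (st.2 + s))], st.2 + s))
      (out, (pre.length : Int))).1 = out ++ cs := by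
  intro cs
  induction cs with
  | nil => intro pre out full _; simp
  | cons c cs' ih =>
    intro pre out full hfull
    simp only [List.map_cons, List.foldl_cons]
    have hslice : PySem.List.slice full (some (pre.length : Int))
        (some ((pre.length : Int) + (c.length : Int))) = c := by
      rw [hfull]
      rw [PySem.List.slice_natCast_add]
      simp [List.flatten_cons, List.drop_left', List.take_left']
    rw [hslice]
    have hlen : ((pre.length : Int) + (c.length : Int)) = (((pre ++ c).length : Nat) : Int) := by
      simp
    rw [hlen]
    have := ih (pre ++ c) (out ++ [c]) full (by simp [hfull, List.flatten_cons])
    simpa [List.append_assoc] using this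

-- ===== VERDICT (by name: the statement is the Claim_ definition above) =====
theorem coalesce_indices_spec : Claim_equal_coalesce_indices := by
  intro indices max_gap _
  unfold Spec_coalesce_indices coalesce_indices coalesce_indices_alt
  match indices with
  | [] => rfl
  | x :: xs =>
    simp only [PySem.List.slice_from_one, List.tail_cons]
    have hA := foldA max_gap xs [] [] x
    simp only [List.nil_append] at hA
    have hL := lensB max_gap xs x [] []
    simp only [List.length_nil, Nat.cast_zero, Int.zero_add, List.nil_append] at hL
    have hS := slices_loop (runsAux max_gap [x] x xs) [] []
      (x :: xs) (by simp [runsAux_flatten])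
    simp only [List.length_nil, Nat.cast_zero, List.nil_append] at hS
    simp only [hA, hL, hS]
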